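-- pv_equiv track=rewrite | github.com/VUmcCGP/wisecondor | wisecondorX/newref_tools.py | _split_by_chr
-- ===== SOURCE A (Python) =====
-- def _split_by_chr(start, end, chr_bin_sums):
--     areas = []
--     tmp = [0, start, 0]
--     for i, val in enumerate(chr_bin_sums):
--         tmp[0] = i
--         if val >= end:
--             break
--         if start < val < end:
--             tmp[2] = val
--             areas.append(tmp)
--             tmp = [i, val, 0]
--         tmp[1] = val
--     tmp[2] = end
--     areas.append(tmp)
--     return areas
-- ===== SOURCE B (Python) =====
-- # Two-phase rewrite: find the break index j first, then build all areas directly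
-- # (comprehension + one closing area) instead of mutating a rolling tmp list.
-- def _split_by_chr(start, end, chr_bin_sums):
--     n = len(chr_bin_sums)
--     j = next((i for i, v in enumerate(chr_bin_sums) if v >= end), n)
--     areas = [[i, chr_bin_sums[i - 1] if i > 0 else start, chr_bin_sums[i]]
--              for i in range(j) if start < chr_bin_sums[i] < end]
--     last_idx = j if j < n else (n - 1 if n else 0)
--     areas.append([last_idx, chr_bin_sums[j - 1] if j > 0 else start, end])
--     return areas
-- ===== Notes on version B (the rewrite author's own statement) =====
-- stated objective: simpler
-- what changed: Replaces A's single loop that mutates a rolling tmp list (with aliasing between the appended area and the next tmp) by a two-phase pass: first locate the break index j, then build all inner areas with a comprehension over range(j) and append one explicitly-computed closing area.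
import Mathlib
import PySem

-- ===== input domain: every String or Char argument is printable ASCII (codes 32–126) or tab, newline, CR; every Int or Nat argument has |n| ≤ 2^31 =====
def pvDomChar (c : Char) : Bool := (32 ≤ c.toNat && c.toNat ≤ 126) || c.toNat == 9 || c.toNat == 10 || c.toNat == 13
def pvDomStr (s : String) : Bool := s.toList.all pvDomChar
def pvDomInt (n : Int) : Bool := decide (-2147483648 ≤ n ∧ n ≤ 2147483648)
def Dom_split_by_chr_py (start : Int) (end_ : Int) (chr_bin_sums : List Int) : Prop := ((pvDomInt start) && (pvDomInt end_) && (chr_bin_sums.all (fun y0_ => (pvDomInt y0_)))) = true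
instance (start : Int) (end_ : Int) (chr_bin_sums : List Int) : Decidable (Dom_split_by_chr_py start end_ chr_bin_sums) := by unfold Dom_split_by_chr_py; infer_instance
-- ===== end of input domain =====

-- B replaces A's mutated rolling `tmp` with a two-phase pass: first locate the break
-- index j, then build the areas by a comprehension plus one closing area (objective: simpler).

-- ===== PORT A =====
-- the for-loop of A: state = (areas so far, tmp as a triple); early `break` returns the state
def splitGoA (start end_ : Int) : List Int → Nat → List (List Int) → Int × Int × Int → List (List Int) × (Int × Int × Int)
  | [], _i, areas, tmp => (areas, tmp)
  | v :: rest, i, areas, (_t0, t1, t2) =>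
    -- tmp[0] = i
    if end_ ≤ v then (areas, ((i : Int), t1, t2))            -- val >= end: break
    else if start < v ∧ v < end_ then
      -- tmp[2]=val; areas.append(tmp); tmp=[i,val,0]; tmp[1]=val
      splitGoA start end_ rest (i+1) (areas ++ [[(i : Int), t1, v]]) ((i : Int), v, 0)
    else
      -- tmp[1] = val
      splitGoA start end_ rest (i+1) areas ((i : Int), v, t2)

def split_by_chr_py (start : Int) (end_ : Int) (chr_bin_sums : List Int) : List (List Int) :=
  let r := splitGoA start end_ chr_bin_sums 0 [] (0, start, 0)
  -- tmp[2] = end; areas.append(tmp)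
  r.1 ++ [[r.2.1, r.2.2.1, end_]]

-- ===== PORT B =====
-- j = first index with value >= end_ (length of the list if none)
def splitJ (end_ : Int) : List Int → Nat
  | [] => 0
  | v :: rest => if end_ ≤ v then 0 else splitJ end_ rest + 1

def split_by_chr_py_alt (start : Int) (end_ : Int) (chr_bin_sums : List Int) : List (List Int) :=
  let n := chr_bin_sums.length
  let j := splitJ end_ chr_bin_sums
  let get := fun (k : Nat) => chr_bin_sums.getD k 0
  let areas := (List.range j).filterMap (fun i =>
    if start < get i ∧ get i < end_ then
      some [(i : Int), if 0 < i then get (i - 1) else start, get i]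
    else none)
  let lastIdx : Int := if j < n then (j : Int) else (if 0 < n then (n : Int) - 1 else 0)
  areas ++ [[lastIdx, if 0 < j then get (j - 1) else start, end_]]

-- ===== PRECONDITION & SPEC =====
def Spec_split_by_chr_py (start : Int) (end_ : Int) (chr_bin_sums : List Int) (out : List (List Int)) : Prop := out = split_by_chr_py_alt start end_ chr_bin_sums
instance (start : Int) (end_ : Int) (chr_bin_sums : List Int) (out : List (List Int)) : Decidable (Spec_split_by_chr_py start end_ chr_bin_sums out) := by unfold Spec_split_by_chr_py; infer_instance

-- ===== CLAIM (what is proved, stated in full; the proofs are below) =====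
def Claim_equal_split_by_chr_py : Prop := ∀ (start : Int) (end_ : Int) (chr_bin_sums : List Int), Dom_split_by_chr_py start end_ chr_bin_sums → Spec_split_by_chr_py start end_ chr_bin_sums (split_by_chr_py start end_ chr_bin_sums)

-- ===== LEMMAS AND PROOFS =====

-- A's loop, accumulator-free, with the trailing closing area already attached
def splitRec (start end_ : Int) : List Int → Nat → Int → Int → List (List Int)
  | [], _i, t0, t1 => [[t0, t1, end_]]
  | v :: rest, i, _t0, t1 =>
    if end_ ≤ v then [[(i : Int), t1, end_]]
    else if start < v ∧ v < end_ then
      [(i : Int), t1, v] :: splitRec start end_ rest (i + 1) (i : Int) v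
    else
      splitRec start end_ rest (i + 1) (i : Int) v

-- B's formula, generalized to start at absolute index i with pending left boundary t1
-- (t0 is the index fallback for the empty list)
def splitSpec (start end_ : Int) (xs : List Int) (i : Nat) (t0 t1 : Int) : List (List Int) :=
  let j := splitJ end_ xs
  let get := fun (k : Nat) => xs.getD k 0
  ((List.range j).filterMap (fun k =>
    if start < get k ∧ get k < end_ then
      some [((i + k : Nat) : Int), if 0 < k then get (k - 1) else t1, get k]
    else none))
  ++ [[ if j < xs.length then ((i + j : Nat) : Int)
        else if 0 < xs.length then ((i + xs.length - 1 : Nat) : Int) else t0,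
        if 0 < j then get (j - 1) else t1, end_ ]]

theorem splitGoA_append (start end_ : Int) :
    ∀ (xs : List Int) (i : Nat) (areas : List (List Int)) (t0 t1 t2 : Int),
      (let r := splitGoA start end_ xs i areas (t0, t1, t2); r.1 ++ [[r.2.1, r.2.2.1, end_]])
      = areas ++ splitRec start end_ xs i t0 t1 := by
  intro xs
  induction xs with
  | nil => intro i areas t0 t1 t2; simp [splitGoA, splitRec]
  | cons v rest ih =>
    intro i areas t0 t1 t2
    simp only [splitGoA, splitRec]
    split_ifs with h1 h2
    · simp
    · rw [ih]; simp
    · rw [ih]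

theorem splitSpec_cons (start end_ v : Int) (rest : List Int) (i : Nat) (t0 t1 : Int)
    (h1 : ¬ end_ ≤ v) :
    splitSpec start end_ (v :: rest) i t0 t1 =
      (if start < v ∧ v < end_ then [[(i : Int), t1, v]] else [])
        ++ splitSpec start end_ rest (i + 1) (i : Int) v := by
  simp only [splitSpec, splitJ, if_neg h1]
  rw [List.range_succ_eq_map]
  simp only [List.filterMap_cons, List.filterMap_map, List.getD_cons_zero, Nat.add_zero]
  have htail :
      List.filterMap
        ((fun k =>
          if start < (v :: rest).getD k 0 ∧ (v :: rest).getD k 0 < end_ then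
            some [((i + k : Nat) : Int),
              if 0 < k then (v :: rest).getD (k - 1) 0 else t1, (v :: rest).getD k 0]
          else none) ∘ (· + 1)) (List.range (splitJ end_ rest))
      = List.filterMap
        (fun k =>
          if start < rest.getD k 0 ∧ rest.getD k 0 < end_ then
            some [((i + 1 + k : Nat) : Int),
              if 0 < k then rest.getD (k - 1) 0 else v, rest.getD k 0]
          else none) (List.range (splitJ end_ rest)) := by
    apply List.filterMap_congr
    intro k _
    simp only [Function.comp]
    by_cases hc : start < rest.getD k 0 ∧ rest.getD k 0 < end_
    · rw [if_pos (by simpa using hc), if_pos hc]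
      rcases Nat.eq_zero_or_pos k with hk | hk
      · subst hk; simp
      · simp only [Nat.add_sub_cancel, if_pos (Nat.succ_pos k), if_pos hk]
        have hk1 : (v :: rest).getD k 0 = rest.getD (k - 1) 0 := by
          obtain ⟨k', rfl⟩ : ∃ k', k = k' + 1 := ⟨k - 1, by omega⟩
          simp
        rw [hk1]
        congr 2
        omega
    · rw [if_neg (by simpa using hc), if_neg hc]
  have hidx :
      (if splitJ end_ rest + 1 < (v :: rest).length then ((i + (splitJ end_ rest + 1) : Nat) : Int)
       else if 0 < (v :: rest).length then ((i + (v :: rest).length - 1 : Nat) : Int) else t0)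
      = (if splitJ end_ rest < rest.length then ((i + 1 + splitJ end_ rest : Nat) : Int)
         else if 0 < rest.length then ((i + 1 + rest.length - 1 : Nat) : Int) else (i : Int)) := by
    by_cases hl : splitJ end_ rest < rest.length
    · rw [if_pos (by simp; omega), if_pos hl]
      congr 1
      omega
    · rw [if_neg (by simp; omega), if_neg hl, if_pos (by simp)]
      rcases Nat.eq_zero_or_pos rest.length with h0 | h0
      · have hj0 : splitJ end_ rest = 0 := by
          cases rest with
          | nil => simp [splitJ]
          | cons a l => simp at h0
        rw [if_neg (by omega)]
        simp [h0]
      · rw [if_pos h0]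
        simp only [List.length_cons]
        congr 1
        omega
  have hleft :
      (if 0 < splitJ end_ rest + 1 then (v :: rest).getD (splitJ end_ rest + 1 - 1) 0 else t1)
      = (if 0 < splitJ end_ rest then rest.getD (splitJ end_ rest - 1) 0 else v) := by
    rw [if_pos (Nat.succ_pos _), Nat.add_sub_cancel]
    rcases Nat.eq_zero_or_pos (splitJ end_ rest) with hj | hj
    · simp [hj]
    · rw [if_pos hj]
      obtain ⟨j', hj'⟩ : ∃ j', splitJ end_ rest = j' + 1 := ⟨_, (Nat.succ_pred_eq_of_pos hj).symm⟩
      rw [hj']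
      simp
  by_cases h2 : start < v ∧ v < end_
  · rw [if_pos h2, if_pos h2, if_neg (lt_irrefl 0), htail, hidx, hleft]
    simp
  · rw [if_neg h2, if_neg h2, htail, hidx, hleft]
    simp

theorem splitRec_eq_spec (start end_ : Int) :
    ∀ (xs : List Int) (i : Nat) (t0 t1 : Int),
      splitRec start end_ xs i t0 t1 = splitSpec start end_ xs i t0 t1 := by
  intro xs
  induction xs with
  | nil => intro i t0 t1; simp [splitRec, splitSpec, splitJ]
  | cons v rest ih =>
    intro i t0 t1
    by_cases h1 : end_ ≤ v
    · simp [splitRec, splitSpec, splitJ, h1]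
    · rw [splitSpec_cons start end_ v rest i t0 t1 h1, ← ih]
      by_cases h2 : start < v ∧ v < end_
      · simp [splitRec, if_neg h1, if_pos h2]
      · simp [splitRec, if_neg h1, if_neg h2]

theorem alt_eq_spec (start end_ : Int) (xs : List Int) :
    split_by_chr_py_alt start end_ xs = splitSpec start end_ xs 0 0 start := by
  simp only [split_by_chr_py_alt, splitSpec, Nat.zero_add]
  refine congrArg₂ _ rfl (congrArg₂ _ (congrArg₂ _ ?_ rfl) rfl)
  by_cases hl : splitJ end_ xs < xs.length
  · simp [hl]
  · rw [if_neg hl, if_neg hl]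
    rcases Nat.eq_zero_or_pos xs.length with h0 | h0
    · simp [h0]
    · rw [if_pos h0, if_pos h0]
      push_cast [Nat.cast_sub (by omega : 1 ≤ xs.length)]
      ring

-- ===== VERDICT (by name: the statement is the Claim_ definition above) =====
theorem split_by_chr_py_spec : Claim_equal_split_by_chr_py := by
  intro start end_ xs _
  show split_by_chr_py start end_ xs = split_by_chr_py_alt start end_ xs
  rw [alt_eq_spec, ← splitRec_eq_spec]
  have h := splitGoA_append start end_ xs 0 [] 0 start 0
  simpa [split_by_chr_py] using h
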